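-- pv_equiv track=rewrite | github.com/awslabs/automated-security-helper | automated_security_helper/plugin_modules/ash_aws_plugins/aws_utils.py | get_fallback_model
-- ===== SOURCE A (Python) =====
-- from typing import Any, Callable, Dict, List, Optional, TypeVar
--
-- def get_fallback_model(current_model_id: str) -> Optional[str]:
--     """
--     Get a fallback model ID if the current model is unavailable.
--
--     Args:
--         current_model_id: The current model ID that failed
--
--     Returns:
--         A fallback model ID or None if no suitable fallback is available
--     """
--     # Define fallback chains for different model families
--     fallback_chains = {
--         "anthropic.claude-": [
--             "anthropic.claude-3-5-sonnet-20241022-v2:0",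
--             "anthropic.claude-3-5-haiku-20241022-v1:0",
--         ],
--         "us.anthropic.claude-": [
--             "us.anthropic.claude-sonnet-4-20250514-v1:0",
--             # "us.anthropic.claude-opus-4-20250514-v1:0",
--             "us.anthropic.claude-3-7-sonnet-20250219-v1:0",
--             "us.anthropic.claude-3-5-sonnet-20240620-v1:0",
--         ],
--         "amazon.titan-": [
--             "amazon.titan-text-express-v1",
--             "amazon.titan-text-lite-v1",
--         ],
--         "us.amazon.nova-": [
--             "us.amazon.nova-pro-v1:0",
--             "us.amazon.nova-lite-v1:0",
--             "us.amazon.nova-micro-v1:0",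
--         ],
--         "us.meta.llama3-": [
--             "us.meta.llama3-3-70b-instruct-v1:0",
--             "us.meta.llama3-2-1b-instruct-v1:0",
--             "us.meta.llama3-2-3b-instruct-v1:0",
--             "us.meta.llama3-2-11b-instruct-v1:0",
--             "us.meta.llama3-1-8b-instruct-v1:0",
--         ],
--         "us.meta.llama4-": [
--             "us.meta.llama4-scout-17b-instruct-v1:0",
--             "us.meta.llama4-maverick-17b-instruct-v1:0",
--         ],
--     }
--
--     # Find the appropriate fallback chain
--     for prefix, models in fallback_chains.items():
--         if current_model_id.startswith(prefix):
--             # Find the current model in the chain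
--             try:
--                 current_index = models.index(current_model_id)
--                 # Return the next model in the chain if available
--                 if current_index < len(models) - 1:
--                     return models[current_index + 1]
--             except ValueError:
--                 # If the current model isn't in our predefined list,
--                 # return the first model in the chain
--                 return models[0]
--
--     # If no specific fallback chain is found, return a default model
--     return "us.amazon.nova-pro-v1:0"
-- ===== SOURCE B (Python) =====
-- _DEFAULT = "us.amazon.nova-pro-v1:0"
--
-- _CHAINS = {
--     "anthropic.claude-": [
--         "anthropic.claude-3-5-sonnet-20241022-v2:0",
--         "anthropic.claude-3-5-haiku-20241022-v1:0",
--     ],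
--     "us.anthropic.claude-": [
--         "us.anthropic.claude-sonnet-4-20250514-v1:0",
--         "us.anthropic.claude-3-7-sonnet-20250219-v1:0",
--         "us.anthropic.claude-3-5-sonnet-20240620-v1:0",
--     ],
--     "amazon.titan-": [
--         "amazon.titan-text-express-v1",
--         "amazon.titan-text-lite-v1",
--     ],
--     "us.amazon.nova-": [
--         "us.amazon.nova-pro-v1:0",
--         "us.amazon.nova-lite-v1:0",
--         "us.amazon.nova-micro-v1:0",
--     ],
--     "us.meta.llama3-": [
--         "us.meta.llama3-3-70b-instruct-v1:0",
--         "us.meta.llama3-2-1b-instruct-v1:0",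
--         "us.meta.llama3-2-3b-instruct-v1:0",
--         "us.meta.llama3-2-11b-instruct-v1:0",
--         "us.meta.llama3-1-8b-instruct-v1:0",
--     ],
--     "us.meta.llama4-": [
--         "us.meta.llama4-scout-17b-instruct-v1:0",
--         "us.meta.llama4-maverick-17b-instruct-v1:0",
--     ],
-- }
--
-- # Global successor table: each known model maps to the next model in its chain,
-- # the last model of a chain maps to the default.
-- _NEXT = {}
-- for _models in _CHAINS.values():
--     for _m, _n in zip(_models, _models[1:] + [_DEFAULT]):
--         _NEXT[_m] = _n
--
--
-- def get_fallback_model(current_model_id: str):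
--     nxt = _NEXT.get(current_model_id)
--     if nxt is not None:
--         return nxt
--     for prefix, models in _CHAINS.items():
--         if current_model_id.startswith(prefix):
--             return models[0]
--     return _DEFAULT
-- ===== Notes on version B (the rewrite author's own statement) =====
-- stated objective: alternative
-- what changed: Replaces A's per-chain try/.index scan with one precomputed global successor table (known model -> next model, last-in-chain -> default) consulted first, followed by a separate startswith pass only for unknown ids.
import Mathlib
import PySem

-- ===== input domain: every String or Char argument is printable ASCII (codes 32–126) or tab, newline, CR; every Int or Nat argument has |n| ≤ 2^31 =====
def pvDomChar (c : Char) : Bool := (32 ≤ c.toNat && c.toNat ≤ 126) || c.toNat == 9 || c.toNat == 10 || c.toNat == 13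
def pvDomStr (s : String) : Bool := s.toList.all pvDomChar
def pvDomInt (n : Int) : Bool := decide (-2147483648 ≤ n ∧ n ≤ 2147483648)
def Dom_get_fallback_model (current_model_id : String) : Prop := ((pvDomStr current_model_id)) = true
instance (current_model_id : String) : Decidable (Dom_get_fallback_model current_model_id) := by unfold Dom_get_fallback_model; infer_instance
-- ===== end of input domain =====

-- B replaces A's per-chain .index scan with one precomputed successor table plus a
-- separate prefix pass (objective: alternative decomposition; same cost at this size).

-- ===== PORT A =====
-- the literal fallback_chains dict of A, in insertion order
def pvChainsA : List (String × List String) :=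
  [ ("anthropic.claude-",
      [ "anthropic.claude-3-5-sonnet-20241022-v2:0",
        "anthropic.claude-3-5-haiku-20241022-v1:0" ]),
    ("us.anthropic.claude-",
      [ "us.anthropic.claude-sonnet-4-20250514-v1:0",
        "us.anthropic.claude-3-7-sonnet-20250219-v1:0",
        "us.anthropic.claude-3-5-sonnet-20240620-v1:0" ]),
    ("amazon.titan-",
      [ "amazon.titan-text-express-v1",
        "amazon.titan-text-lite-v1" ]),
    ("us.amazon.nova-",
      [ "us.amazon.nova-pro-v1:0",
        "us.amazon.nova-lite-v1:0",
        "us.amazon.nova-micro-v1:0" ]),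
    ("us.meta.llama3-",
      [ "us.meta.llama3-3-70b-instruct-v1:0",
        "us.meta.llama3-2-1b-instruct-v1:0",
        "us.meta.llama3-2-3b-instruct-v1:0",
        "us.meta.llama3-2-11b-instruct-v1:0",
        "us.meta.llama3-1-8b-instruct-v1:0" ]),
    ("us.meta.llama4-",
      [ "us.meta.llama4-scout-17b-instruct-v1:0",
        "us.meta.llama4-maverick-17b-instruct-v1:0" ]) ]

-- A's for-loop over the chains: try models.index (ValueError → first model),
-- else return the next model if not last, else continue the loop.
def pvLoopA (s : String) : List (String × List String) → Option String
  | [] => some "us.amazon.nova-pro-v1:0"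
  | (pfx, models) :: rest =>
    if PySem.Str.startswith s pfx then
      match PySem.List.index? models s with
      | some i =>
        if i < models.length - 1 then
          some (models.getD (i + 1) "")   -- models[i+1]; in range since i < len-1
        else pvLoopA s rest
      | none => some (models.getD 0 "")   -- models[0]; every chain is nonempty
    else pvLoopA s rest

def get_fallback_model (current_model_id : String) : Option String :=
  pvLoopA current_model_id pvChainsA

-- ===== PORT B =====
def pvDefault : String := "us.amazon.nova-pro-v1:0"

-- B's _NEXT table: for each chain, zip(models, models[1:] + [DEFAULT]) into a dict
def pvNext : PySem.Dict String String :=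
  pvChainsA.foldl
    (fun d pm => (pm.2.zip (pm.2.drop 1 ++ [pvDefault])).foldl
        (fun d mn => d.insert mn.1 mn.2) d)
    PySem.Dict.empty

-- B's prefix pass
def pvPrefixB (s : String) : List (String × List String) → Option String
  | [] => some pvDefault
  | (pfx, models) :: rest =>
    if PySem.Str.startswith s pfx then some (models.getD 0 "")
    else pvPrefixB s rest

def get_fallback_model_alt (current_model_id : String) : Option String :=
  match pvNext.get? current_model_id with
  | some nxt => some nxt
  | none => pvPrefixB current_model_id pvChainsA

-- ===== PRECONDITION & SPEC =====
def Spec_get_fallback_model (current_model_id : String) (out : Option String) : Prop := out = get_fallback_model_alt current_model_id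
instance (current_model_id : String) (out : Option String) : Decidable (Spec_get_fallback_model current_model_id out) := by unfold Spec_get_fallback_model; infer_instance

-- ===== CLAIM (what is proved, stated in full; the proofs are below) =====
def Claim_equal_get_fallback_model : Prop := ∀ (current_model_id : String), Dom_get_fallback_model current_model_id → Spec_get_fallback_model current_model_id (get_fallback_model current_model_id)

-- ===== LEMMAS AND PROOFS =====

-- all model ids occurring in any chain (the keys of pvNext)
def pvAllModels : List String := pvChainsA.flatMap (·.2)

theorem pv_known (s : String) (hm : s ∈ pvAllModels) :
    get_fallback_model s = get_fallback_model_alt s := by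
  fin_cases hm <;> decide

theorem pv_unknown (s : String) (hm : s ∉ pvAllModels) :
    get_fallback_model s = get_fallback_model_alt s := by
  simp only [pvAllModels, pvChainsA, List.flatMap_cons, List.flatMap_nil,
    List.append_nil, List.cons_append, List.nil_append, List.mem_cons,
    List.not_mem_nil, or_false, not_or] at hm
  obtain ⟨h1,h2,h3,h4,h5,h6,h7,h8,h9,h10,h11,h12,h13,h14,h15,h16,h17⟩ := hm
  have hnone : pvNext.get? s = none := by
    simp [pvNext, pvChainsA, pvDefault, List.foldl, List.zip,
      PySem.Dict.get?_insert, PySem.Dict.get?_empty, h1,h2,h3,h4,h5,h6,h7,h8,h9,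
      h10,h11,h12,h13,h14,h15,h16,h17]
  have i1 : List.idxOf? s ["anthropic.claude-3-5-sonnet-20241022-v2:0",
      "anthropic.claude-3-5-haiku-20241022-v1:0"] = none :=
    List.idxOf?_eq_none_iff.mpr (by simp [h1, h2])
  have i2 : List.idxOf? s ["us.anthropic.claude-sonnet-4-20250514-v1:0",
      "us.anthropic.claude-3-7-sonnet-20250219-v1:0",
      "us.anthropic.claude-3-5-sonnet-20240620-v1:0"] = none :=
    List.idxOf?_eq_none_iff.mpr (by simp [h3, h4, h5])
  have i3 : List.idxOf? s ["amazon.titan-text-express-v1",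
      "amazon.titan-text-lite-v1"] = none :=
    List.idxOf?_eq_none_iff.mpr (by simp [h6, h7])
  have i4 : List.idxOf? s ["us.amazon.nova-pro-v1:0", "us.amazon.nova-lite-v1:0",
      "us.amazon.nova-micro-v1:0"] = none :=
    List.idxOf?_eq_none_iff.mpr (by simp [h8, h9, h10])
  have i5 : List.idxOf? s ["us.meta.llama3-3-70b-instruct-v1:0",
      "us.meta.llama3-2-1b-instruct-v1:0", "us.meta.llama3-2-3b-instruct-v1:0",
      "us.meta.llama3-2-11b-instruct-v1:0", "us.meta.llama3-1-8b-instruct-v1:0"] = none :=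
    List.idxOf?_eq_none_iff.mpr (by simp [h11, h12, h13, h14, h15])
  have i6 : List.idxOf? s ["us.meta.llama4-scout-17b-instruct-v1:0",
      "us.meta.llama4-maverick-17b-instruct-v1:0"] = none :=
    List.idxOf?_eq_none_iff.mpr (by simp [h16, h17])
  simp [get_fallback_model, get_fallback_model_alt, hnone, pvChainsA, pvLoopA,
    pvPrefixB, pvDefault, i1, i2, i3, i4, i5, i6]

-- ===== VERDICT (by name: the statement is the Claim_ definition above) =====
theorem get_fallback_model_spec : Claim_equal_get_fallback_model := by
  intro s _
  unfold Spec_get_fallback_model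
  by_cases hm : s ∈ pvAllModels
  · exact pv_known s hm
  · exact pv_unknown s hm
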